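-- pv_equiv track=rewrite | github.com/lukelookluck/algorithm_exam | 백준/9184 신나는 함수 실행.py | solution
-- ===== SOURCE A (Python) =====
-- def solution(x, y, z):
--     if x <= 0 or y <= 0 or z <= 0:
--         return 1
--
--     if x > 20 or y > 20 or z > 20:
--         return solution(20, 20, 20)
--
--     if check[x][y][z]:
--         return check[x][y][z]
--
--     if x < y < z:
--         check[x][y][z] = solution(x, y, z-1) + solution(x, y-1, z-1) - solution(x, y-1, z)
--         return check[x][y][z]
--
--     else:
--         check[x][y][z] = solution(x-1, y, z) + solution(x-1, y-1, z) + solution(x-1, y, z-1) - solution(x-1, y-1, z-1)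
--         return check[x][y][z]
--
-- check = [[[0] * 21 for _ in range(21)] for _ in range(21)]
-- ===== SOURCE B (Python) =====
-- def solution(x, y, z):
--     # Bottom-up: fill a dict W over 1..20 cube with the w-recurrence (0-coordinate cells count as 1).
--     W = {}
--     def get(a, b, c):
--         return 1 if a == 0 or b == 0 or c == 0 else W[(a, b, c)]
--     for a in range(1, 21):
--         for b in range(1, 21):
--             for c in range(1, 21):
--                 if a < b < c:
--                     W[(a, b, c)] = get(a, b, c - 1) + get(a, b - 1, c - 1) - get(a, b - 1, c)
--                 else:
--                     W[(a, b, c)] = get(a - 1, b, c) + get(a - 1, b - 1, c) + get(a - 1, b, c - 1) - get(a - 1, b - 1, c - 1)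
--     if x <= 0 or y <= 0 or z <= 0:
--         return 1
--     if x > 20 or y > 20 or z > 20:
--         return W[(20, 20, 20)]
--     return W[(x, y, z)]
-- ===== Notes on version B (the rewrite author's own statement) =====
-- stated objective: alternative
-- what changed: Replaces A's top-down memoized recursion (global 3D memo list) with a bottom-up triple loop over the 1..20 cube that fills a dictionary with the same recurrence, then answers queries by clamping and a single lookup.
import Mathlib
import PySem

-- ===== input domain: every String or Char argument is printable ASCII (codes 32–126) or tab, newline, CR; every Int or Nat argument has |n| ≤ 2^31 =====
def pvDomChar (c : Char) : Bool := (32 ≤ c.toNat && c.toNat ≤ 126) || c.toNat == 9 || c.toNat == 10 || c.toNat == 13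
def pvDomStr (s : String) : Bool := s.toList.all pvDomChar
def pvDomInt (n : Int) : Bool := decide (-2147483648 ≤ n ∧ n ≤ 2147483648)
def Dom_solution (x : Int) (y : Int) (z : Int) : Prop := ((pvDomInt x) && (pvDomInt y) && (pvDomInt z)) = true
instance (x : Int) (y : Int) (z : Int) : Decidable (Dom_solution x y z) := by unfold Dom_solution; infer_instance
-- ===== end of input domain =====

-- B replaces A's top-down memoized recursion with a bottom-up triple loop that fills the 1..20 cube
-- (objective: alternative decomposition, same cost). A's Python keeps its memo in a module-level
-- global that persists across calls; cached values always equal the recomputed ones, so the port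
-- threads a fresh memo through each call — the RETURN value is identical.

-- ===== PORT A =====
-- fuel bound for A's recursion: the clamp call goes to (20,20,20), whose coordinate sum
-- (at most 60) is below the flat 100 assigned to any clamped input; in-range calls shrink the sum,
-- so 'pvMeas x y z + 1' units of fuel always suffice (proved in go_spec below)
def pvMeas (x : Int) (y : Int) (z : Int) : Nat :=
  if 20 < x ∨ 20 < y ∨ 20 < z then 100 else (x + y + z).toNat

def solutionGo : Nat → PySem.Dict (Int × Int × Int) Int → Int → Int → Int →
    Int × PySem.Dict (Int × Int × Int) Int
  | 0, memo, _, _, _ => (0, memo)  -- never reached: the fuel starts above pvMeas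
  | fuel + 1, memo, x, y, z =>
    if x ≤ 0 ∨ y ≤ 0 ∨ z ≤ 0 then (1, memo)
    else if 20 < x ∨ 20 < y ∨ 20 < z then solutionGo fuel memo 20 20 20
    else
      -- check[x][y][z] starts at 0; 'if check[x][y][z]:' is a ≠ 0 test (Python reads the cell twice)
      if memo.getD (x, y, z) 0 ≠ 0 then (memo.getD (x, y, z) 0, memo)
      else if x < y ∧ y < z then
        let p1 := solutionGo fuel memo x y (z - 1)
        let p2 := solutionGo fuel p1.2 x (y - 1) (z - 1)
        let p3 := solutionGo fuel p2.2 x (y - 1) z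
        let r := p1.1 + p2.1 - p3.1
        (r, p3.2.insert (x, y, z) r)
      else
        let p1 := solutionGo fuel memo (x - 1) y z
        let p2 := solutionGo fuel p1.2 (x - 1) (y - 1) z
        let p3 := solutionGo fuel p2.2 (x - 1) y (z - 1)
        let p4 := solutionGo fuel p3.2 (x - 1) (y - 1) (z - 1)
        let r := p1.1 + p2.1 + p3.1 - p4.1
        (r, p4.2.insert (x, y, z) r)

def solution (x : Int) (y : Int) (z : Int) : Int :=
  (solutionGo (pvMeas x y z + 1) PySem.Dict.empty x y z).1

-- ===== PORT B =====
-- get(a,b,c): a 0 coordinate is the base case 1, otherwise a table lookup; at every use site the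
-- key is already present, so getD's default 0 is never the result (exact port of Source B's W[(a,b,c)])
def wGet (W : PySem.Dict (Int × Int × Int) Int) (a b c : Int) : Int :=
  if a = 0 ∨ b = 0 ∨ c = 0 then 1 else W.getD (a, b, c) 0

def buildW : PySem.Dict (Int × Int × Int) Int :=
  (PySem.List.pyRange 1 21 1).foldl (fun W a =>
    (PySem.List.pyRange 1 21 1).foldl (fun W b =>
      (PySem.List.pyRange 1 21 1).foldl (fun W c =>
        if a < b ∧ b < c then
          W.insert (a, b, c) (wGet W a b (c - 1) + wGet W a (b - 1) (c - 1) - wGet W a (b - 1) c)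
        else
          W.insert (a, b, c)
            (wGet W (a - 1) b c + wGet W (a - 1) (b - 1) c + wGet W (a - 1) b (c - 1)
              - wGet W (a - 1) (b - 1) (c - 1))) W) W) PySem.Dict.empty

def solution_alt (x : Int) (y : Int) (z : Int) : Int :=
  let W := buildW
  if x ≤ 0 ∨ y ≤ 0 ∨ z ≤ 0 then 1
  else if 20 < x ∨ 20 < y ∨ 20 < z then W.getD (20, 20, 20) 0
  else W.getD (x, y, z) 0

-- ===== PRECONDITION & SPEC =====
def Spec_solution (x : Int) (y : Int) (z : Int) (out : Int) : Prop := out = solution_alt x y z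
instance (x : Int) (y : Int) (z : Int) (out : Int) : Decidable (Spec_solution x y z out) := by unfold Spec_solution; infer_instance

-- ===== CLAIM (what is proved, stated in full; the proofs are below) =====
def Claim_equal_solution : Prop := ∀ (x : Int) (y : Int) (z : Int), Dom_solution x y z → Spec_solution x y z (solution x y z)

-- ===== LEMMAS AND PROOFS =====

-- the mathematical w function both programs compute (proof-layer reference)
def Wp (x y z : Int) : Int :=
  if x ≤ 0 ∨ y ≤ 0 ∨ z ≤ 0 then 1
  else if x < y ∧ y < z then Wp x y (z - 1) + Wp x (y - 1) (z - 1) - Wp x (y - 1) z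
  else Wp (x - 1) y z + Wp (x - 1) (y - 1) z + Wp (x - 1) y (z - 1) - Wp (x - 1) (y - 1) (z - 1)
termination_by (x + y + z).toNat
decreasing_by all_goals omega

-- both programs' full behaviour, expressed through Wp
def WpI (x y z : Int) : Int :=
  if x ≤ 0 ∨ y ≤ 0 ∨ z ≤ 0 then 1
  else if 20 < x ∨ 20 < y ∨ 20 < z then Wp 20 20 20
  else Wp x y z

lemma Wp_base {x y z : Int} (h : x ≤ 0 ∨ y ≤ 0 ∨ z ≤ 0) : Wp x y z = 1 := by
  rw [Wp]; simp [h]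

lemma WpI_eq_Wp {x y z : Int} (hx0 : 0 ≤ x) (hx : x ≤ 20) (hy0 : 0 ≤ y) (hy : y ≤ 20)
    (hz0 : 0 ≤ z) (hz : z ≤ 20) : WpI x y z = Wp x y z := by
  unfold WpI
  split_ifs with h1 h2
  · exact (Wp_base h1).symm
  · omega
  · rfl

-- ----- A side -----
def GoodM (m : PySem.Dict (Int × Int × Int) Int) : Prop :=
  ∀ (i j k v : Int), m.get? (i, j, k) = some v → v = Wp i j k

lemma getD_ne_zero_get? {m : PySem.Dict (Int × Int × Int) Int} {p : Int × Int × Int}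
    (h : m.getD p 0 ≠ 0) : m.get? p = some (m.getD p 0) := by
  rcases hg : m.get? p with _ | v
  · rw [PySem.Dict.getD_eq_get?_getD, hg] at h; simp at h
  · rw [PySem.Dict.getD_eq_get?_getD, hg]; rfl

lemma go_spec : ∀ (n : Nat) (x y z : Int) (m : PySem.Dict (Int × Int × Int) Int),
    pvMeas x y z < n → GoodM m →
    (solutionGo n m x y z).1 = WpI x y z ∧ GoodM (solutionGo n m x y z).2 := by
  intro n
  induction n with
  | zero => intro x y z m hn hg; omega
  | succ n ih =>
    intro x y z m hn hg
    rw [solutionGo]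
    by_cases h1 : x ≤ 0 ∨ y ≤ 0 ∨ z ≤ 0
    · simp only [h1, if_true]; exact ⟨by rw [WpI]; simp [h1], hg⟩
    simp only [h1, if_false]
    by_cases h2 : 20 < x ∨ 20 < y ∨ 20 < z
    · simp only [h2, if_true]
      have hm : pvMeas 20 20 20 < n := by
        simp only [pvMeas] at hn ⊢; split_ifs at hn ⊢ <;> omega
      obtain ⟨hv, hgd⟩ := ih 20 20 20 m hm hg
      refine ⟨?_, hgd⟩
      rw [hv]
      simp only [WpI]
      split_ifs <;> first | rfl | omega
    simp only [h2, if_false]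
    push Not at h1 h2
    obtain ⟨hx1, hy1, hz1⟩ := h1
    obtain ⟨hx2, hy2, hz2⟩ := h2
    have hmn : (x + y + z).toNat < n + 1 := by
      simp only [pvMeas] at hn; split_ifs at hn <;> omega
    have hWpI : WpI x y z = Wp x y z := WpI_eq_Wp (by omega) hx2 (by omega) hy2 (by omega) hz2
    by_cases h3 : m.getD (x, y, z) 0 ≠ 0
    · rw [if_pos h3]
      exact ⟨by rw [hWpI]; exact hg x y z _ (getD_ne_zero_get? h3), hg⟩
    rw [if_neg h3]
    have hins : ∀ (m' : PySem.Dict (Int × Int × Int) Int), GoodM m' →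
        GoodM (m'.insert (x, y, z) (Wp x y z)) := by
      intro m' hm' i j k v hv
      rw [PySem.Dict.get?_insert] at hv
      split_ifs at hv with he
      · cases he; cases hv; rfl
      · exact hm' i j k v hv
    have call : ∀ (x' y' z' : Int) (m' : PySem.Dict (Int × Int × Int) Int), GoodM m' →
        0 ≤ x' → x' ≤ 20 → 0 ≤ y' → y' ≤ 20 → 0 ≤ z' → z' ≤ 20 → (x' + y' + z').toNat < n →
        (solutionGo n m' x' y' z').1 = Wp x' y' z' ∧ GoodM (solutionGo n m' x' y' z').2 := by
      intro x' y' z' m' hm' a1 a2 b1 b2 c1 c2 hlt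
      have : pvMeas x' y' z' < n := by simp only [pvMeas]; split_ifs <;> omega
      obtain ⟨h, h'⟩ := ih x' y' z' m' this hm'
      exact ⟨by rw [h]; exact WpI_eq_Wp a1 a2 b1 b2 c1 c2, h'⟩
    by_cases h4 : x < y ∧ y < z
    · rw [if_pos h4]
      obtain ⟨e1, g1⟩ := call x y (z - 1) m hg (by omega) hx2 (by omega) hy2 (by omega) (by omega) (by omega)
      obtain ⟨e2, g2⟩ := call x (y - 1) (z - 1) _ g1 (by omega) hx2 (by omega) (by omega) (by omega) (by omega) (by omega)
      obtain ⟨e3, g3⟩ := call x (y - 1) z _ g2 (by omega) hx2 (by omega) (by omega) (by omega) hz2 (by omega)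
      have hr : Wp x y (z-1) + Wp x (y-1) (z-1) - Wp x (y-1) z = Wp x y z := by
        conv_rhs => rw [Wp]
        have hb : ¬ (x ≤ 0 ∨ y ≤ 0 ∨ z ≤ 0) := by omega
        simp [hb, h4]
      refine ⟨?_, ?_⟩
      · simp only [e1, e2, e3, hWpI, hr]
      · simp only [e1, e2, e3, hr]; exact hins _ g3
    · rw [if_neg h4]
      obtain ⟨e1, g1⟩ := call (x-1) y z m hg (by omega) (by omega) (by omega) hy2 (by omega) hz2 (by omega)
      obtain ⟨e2, g2⟩ := call (x-1) (y-1) z _ g1 (by omega) (by omega) (by omega) (by omega) (by omega) hz2 (by omega)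
      obtain ⟨e3, g3⟩ := call (x-1) y (z-1) _ g2 (by omega) (by omega) (by omega) hy2 (by omega) (by omega) (by omega)
      obtain ⟨e4, g4⟩ := call (x-1) (y-1) (z-1) _ g3 (by omega) (by omega) (by omega) (by omega) (by omega) (by omega) (by omega)
      have hr : Wp (x-1) y z + Wp (x-1) (y-1) z + Wp (x-1) y (z-1) - Wp (x-1) (y-1) (z-1) = Wp x y z := by
        conv_rhs => rw [Wp]
        have hb : ¬ (x ≤ 0 ∨ y ≤ 0 ∨ z ≤ 0) := by omega
        simp [hb, h4]
      refine ⟨?_, ?_⟩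
      · simp only [e1, e2, e3, e4, hWpI, hr]
      · simp only [e1, e2, e3, e4, hr]; exact hins _ g4

lemma solution_eq_WpI (x y z : Int) : solution x y z = WpI x y z := by
  have := go_spec (pvMeas x y z + 1) x y z PySem.Dict.empty (Nat.lt_succ_self _)
    (by intro i j k v h; rw [PySem.Dict.get?_empty] at h; cases h)
  exact this.1

-- ----- B side -----
-- cells lexicographically before (a,b,c) in the 1..20 cube are already filled with Wp
def Done (W : PySem.Dict (Int × Int × Int) Int) (a b c : Int) : Prop :=
  ∀ (i j k : Int), 1 ≤ i → i ≤ 20 → 1 ≤ j → j ≤ 20 → 1 ≤ k → k ≤ 20 →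
    (i < a ∨ (i = a ∧ (j < b ∨ (j = b ∧ k < c)))) → W.get? (i, j, k) = some (Wp i j k)

lemma foldl_inv {σ : Type} (f : σ → Int → σ) (inv : Int → σ → Prop) (lo : Int) (d : Nat) :
    ∀ (s : σ), inv lo s →
    (∀ i t, lo ≤ i → i < lo + d → inv i t → inv (i + 1) (f t i)) →
    inv (lo + d) ((PySem.List.pyRange lo (lo + d) 1).foldl f s) := by
  induction d with
  | zero =>
    intro s h0 _
    rw [PySem.List.pyRange_one_eq_nil (by omega)]
    simpa using h0
  | succ d ih =>
    intro s h0 hstep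
    have he : lo + ((d + 1 : Nat) : Int) = (lo + (d : Int)) + 1 := by push_cast; ring
    rw [he, PySem.List.pyRange_one_succ_right (show lo ≤ lo + (d:Int) by omega), List.foldl_append,
      List.foldl_cons, List.foldl_nil]
    exact hstep _ _ (by omega) (by omega)
      (ih s h0 (fun i t h1 h2 ht => hstep i t h1 (by push_cast; omega) ht))

lemma foldl_inv' {σ : Type} (f : σ → Int → σ) (inv : Int → σ → Prop) (lo hi : Int) (s : σ)
    (hle : lo ≤ hi) (h0 : inv lo s)
    (hstep : ∀ i t, lo ≤ i → i < hi → inv i t → inv (i + 1) (f t i)) :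
    inv hi ((PySem.List.pyRange lo hi 1).foldl f s) := by
  have hd : hi = lo + ((hi - lo).toNat : Int) := by omega
  rw [hd] at hstep ⊢
  exact foldl_inv f inv lo _ s h0 hstep

lemma wGet_eq {W : PySem.Dict (Int × Int × Int) Int} {a b c : Int} {i j k : Int}
    (hD : Done W a b c)
    (hi0 : 0 ≤ i) (hi : i ≤ 20) (hj0 : 0 ≤ j) (hj : j ≤ 20) (hk0 : 0 ≤ k) (hk : k ≤ 20)
    (hlex : i = 0 ∨ j = 0 ∨ k = 0 ∨ i < a ∨ (i = a ∧ (j < b ∨ (j = b ∧ k < c)))) :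
    wGet W i j k = Wp i j k := by
  unfold wGet
  by_cases h0 : i = 0 ∨ j = 0 ∨ k = 0
  · rw [if_pos h0, Wp_base (by omega)]
  · rw [if_neg h0]
    have := hD i j k (by omega) hi (by omega) hj (by omega) hk (by omega)
    rw [PySem.Dict.getD_eq_get?_getD, this]; rfl

-- two lex-bound reshufflings of Done (wrap a finished inner loop into the next outer index)
lemma Done_next_b {W : PySem.Dict (Int × Int × Int) Int} {a b : Int}
    (h : Done W a b 21) : Done W a (b + 1) 1 :=
  fun i j k h1 h2 h3 h4 h5 h6 hlex => h i j k h1 h2 h3 h4 h5 h6 (by omega)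

lemma Done_next_a {W : PySem.Dict (Int × Int × Int) Int} {a : Int}
    (h : Done W a 21 1) : Done W (a + 1) 1 1 :=
  fun i j k h1 h2 h3 h4 h5 h6 hlex => h i j k h1 h2 h3 h4 h5 h6 (by omega)

lemma Done_buildW : Done buildW 21 1 1 := by
  unfold buildW
  refine foldl_inv' _ (fun a W => Done W a 1 1) 1 21 _ (by omega)
    (fun i j k _ _ _ _ _ _ h => by omega) ?_
  intro a W ha1 ha2 hW
  refine Done_next_a (foldl_inv' _ (fun b W => Done W a b 1) 1 21 W (by omega) hW ?_)
  intro b W' hb1 hb2 hWb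
  refine Done_next_b (foldl_inv' _ (fun c W => Done W a b c) 1 21 W' (by omega) hWb ?_)
  intro c W'' hc1 hc2 hWc
  show Done (if a < b ∧ b < c then _ else _) a b (c + 1)
  have hval : (if a < b ∧ b < c then
      W''.insert (a, b, c)
        (wGet W'' a b (c - 1) + wGet W'' a (b - 1) (c - 1) - wGet W'' a (b - 1) c)
    else
      W''.insert (a, b, c)
        (wGet W'' (a - 1) b c + wGet W'' (a - 1) (b - 1) c + wGet W'' (a - 1) b (c - 1)
          - wGet W'' (a - 1) (b - 1) (c - 1))) = W''.insert (a, b, c) (Wp a b c) := by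
    split_ifs with hlt
    · rw [wGet_eq hWc (by omega) (by omega) (by omega) (by omega) (by omega) (by omega) (by omega),
         wGet_eq hWc (by omega) (by omega) (by omega) (by omega) (by omega) (by omega) (by omega),
         wGet_eq hWc (by omega) (by omega) (by omega) (by omega) (by omega) (by omega) (by omega)]
      congr 1
      conv_rhs => rw [Wp]
      have hb : ¬ (a ≤ 0 ∨ b ≤ 0 ∨ c ≤ 0) := by omega
      simp [hb, hlt]
    · rw [wGet_eq hWc (by omega) (by omega) (by omega) (by omega) (by omega) (by omega) (by omega),
         wGet_eq hWc (by omega) (by omega) (by omega) (by omega) (by omega) (by omega) (by omega),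
         wGet_eq hWc (by omega) (by omega) (by omega) (by omega) (by omega) (by omega) (by omega),
         wGet_eq hWc (by omega) (by omega) (by omega) (by omega) (by omega) (by omega) (by omega)]
      congr 1
      conv_rhs => rw [Wp]
      have hb : ¬ (a ≤ 0 ∨ b ≤ 0 ∨ c ≤ 0) := by omega
      simp [hb, hlt]
  rw [hval]
  intro i j k h1 h2 h3 h4 h5 h6 hlex
  rw [PySem.Dict.get?_insert]
  split_ifs with he
  · obtain ⟨hi, hj, hk⟩ : i = a ∧ j = b ∧ k = c := by simpa [Prod.ext_iff] using he
    subst hi; subst hj; subst hk; rfl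
  · have hne : ¬ (i = a ∧ j = b ∧ k = c) := fun ⟨u1, u2, u3⟩ => he (by simp [u1, u2, u3])
    exact hWc i j k h1 h2 h3 h4 h5 h6 (by omega)

lemma buildW_getD {i j k : Int} (h1 : 1 ≤ i) (h2 : i ≤ 20) (h3 : 1 ≤ j) (h4 : j ≤ 20)
    (h5 : 1 ≤ k) (h6 : k ≤ 20) : buildW.getD (i, j, k) 0 = Wp i j k := by
  rw [PySem.Dict.getD_eq_get?_getD, Done_buildW i j k h1 h2 h3 h4 h5 h6 (by omega)]; rfl

lemma solution_alt_eq_WpI (x y z : Int) : solution_alt x y z = WpI x y z := by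
  unfold solution_alt WpI
  split_ifs with h1 h2
  · rfl
  · exact buildW_getD (by omega) (by omega) (by omega) (by omega) (by omega) (by omega)
  · push Not at h1 h2
    exact buildW_getD (by omega) (by omega) (by omega) (by omega) (by omega) (by omega)

-- ===== VERDICT (by name: the statement is the Claim_ definition above) =====
theorem solution_spec : Claim_equal_solution := by
  intro x y z _
  unfold Spec_solution
  rw [solution_eq_WpI, solution_alt_eq_WpI]
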